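-- pv_equiv track=rewrite | github.com/Yzdraall/TekTonik_Generator | sat_peut_etre.py | nbr_poss_zones
-- ===== SOURCE A (Python) =====
-- def max_tab(tab):
--     max = tab[0][0]
--     for i in range(len(tab)):
--         for j in range(len(tab[i])):
--             if max<tab[i][j]:
--                 max = tab[i][j]
--     return max
--
-- def compte_cases_zone(zones):
--     liste = [0]*(max_tab(zones)+1)
--     for i in range(len(zones)):
--         for j in range(len(zones[i])):
--             liste[zones[i][j]]+=1
--     return liste
--
-- def nbr_poss_zones(zones):
--     dico = {}
--     max = max_tab(zones)
--     for i in range(1,max+1):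
--         dico[i] = []
--         for a in range(1,compte_cases_zone(zones)[i-1]+1):
--             dico[i].append(a)
--     return dico
-- ===== SOURCE B (Python) =====
-- def nbr_poss_zones(zones):
--     cells = [v for row in zones for v in row]
--     mx = max(cells)
--     counts = [0] * (mx + 1)
--     for v in cells:
--         counts[v] += 1
--     return {i: list(range(1, counts[i - 1] + 1)) for i in range(1, mx + 1)}
-- ===== Notes on version B (the rewrite author's own statement) =====
-- stated objective: faster
-- what changed: B flattens the grid once, computes the count array a single time and builds each key's list directly as list(range(1, count+1)), instead of recomputing the whole count array (each recomputation re-scanning the grid and re-running the max scan) for every key 1..max and appending the elements one by one.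
-- outside the precondition, e.g. on nbr_poss_zones([[0, -2]]): A returns {}, B raises IndexError
import Mathlib
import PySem

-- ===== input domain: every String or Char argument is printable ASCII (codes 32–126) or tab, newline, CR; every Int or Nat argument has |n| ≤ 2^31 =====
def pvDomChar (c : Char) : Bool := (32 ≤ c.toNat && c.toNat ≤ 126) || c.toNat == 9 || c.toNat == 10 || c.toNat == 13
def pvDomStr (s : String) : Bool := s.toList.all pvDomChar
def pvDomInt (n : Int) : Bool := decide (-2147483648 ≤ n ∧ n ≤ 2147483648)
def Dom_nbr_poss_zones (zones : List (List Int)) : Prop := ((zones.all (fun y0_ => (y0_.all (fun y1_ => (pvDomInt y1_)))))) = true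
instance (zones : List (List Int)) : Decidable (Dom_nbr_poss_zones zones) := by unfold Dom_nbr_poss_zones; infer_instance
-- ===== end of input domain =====

-- B computes the count array once and builds each key's list directly as a range, instead of
-- recomputing the whole count array for every key and appending element by element (faster: O(n+m) counting vs O(m*(n+m))).


-- ===== PORT A =====
def pv_max_tab (tab : List (List Int)) : Int :=
  let m0 := (PySem.List.pyGet? ((PySem.List.pyGet? tab 0).getD []) 0).getD 0
  tab.foldl (fun m row => row.foldl (fun m x => if m < x then x else m) m) m0

def pv_compte_cases_zone (zones : List (List Int)) : List Int :=
  let liste := List.replicate (pv_max_tab zones + 1).toNat 0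
  zones.foldl
    (fun l row => row.foldl (fun l v => PySem.List.pySetD l v (PySem.List.pyGetD l v 0 + 1)) l)
    liste

def nbr_poss_zones (zones : List (List Int)) : List (Int × List Int) :=
  let mx := pv_max_tab zones
  ((PySem.List.pyRange 1 (mx + 1) 1).foldl
    (fun dico i =>
      let dico := dico.insert i ([] : List Int)
      (PySem.List.pyRange 1 (PySem.List.pyGetD (pv_compte_cases_zone zones) (i - 1) 0 + 1) 1).foldl
        (fun dico a => dico.modify i [] (fun l => l ++ [a])) dico)
    PySem.Dict.empty).items

-- ===== PORT B =====
def nbr_poss_zones_alt (zones : List (List Int)) : List (Int × List Int) :=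
  let cells := zones.flatten
  let mx := (PySem.List.max? cells (fun v => v)).getD 0
  let counts := cells.foldl
    (fun l v => PySem.List.pySetD l v (PySem.List.pyGetD l v 0 + 1))
    (List.replicate (mx + 1).toNat 0)
  ((PySem.List.pyRange 1 (mx + 1) 1).foldl
    (fun d i => d.insert i (PySem.List.pyRange 1 (PySem.List.pyGetD counts (i - 1) 0 + 1) 1))
    PySem.Dict.empty).items

-- ===== PRECONDITION & SPEC =====
-- Pre_ excludes exactly the inputs where A raises (empty zones, empty first row, or a negative
-- id below -(max+1)) and, in addition, the all-nonpositive grids containing an id below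
-- -(max+1), where A returns {} only because its key loop never runs while B's one-shot
-- counting pass raises IndexError there.
def Pre_nbr_poss_zones (zones : List (List Int)) : Prop :=
  zones ≠ [] ∧ zones.head! ≠ [] ∧
    ∀ v ∈ zones.flatten, v < 0 → ∃ w ∈ zones.flatten, -(w + 1) ≤ v
instance (zones : List (List Int)) : Decidable (Pre_nbr_poss_zones zones) := by
  unfold Pre_nbr_poss_zones; infer_instance

def pvWitness_nbr_poss_zones : List (List Int) := [[1, 2], [0]]

def Spec_nbr_poss_zones (zones : List (List Int)) (out : List (Int × List Int)) : Prop :=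
  out = nbr_poss_zones_alt zones
instance (zones : List (List Int)) (out : List (Int × List Int)) : Decidable (Spec_nbr_poss_zones zones out) := by
  unfold Spec_nbr_poss_zones; infer_instance

-- ===== CLAIM (what is proved, stated in full; the proofs are below) =====
def Claim_equal_nbr_poss_zones : Prop := ∀ (zones : List (List Int)), Dom_nbr_poss_zones zones → Pre_nbr_poss_zones zones → Spec_nbr_poss_zones zones (nbr_poss_zones zones)

-- ===== LEMMAS AND PROOFS =====

theorem if_lt_eq_max : (fun (m x : Int) => if m < x then x else m) = max := by
  funext m x
  by_cases h : m < x
  · rw [if_pos h, max_eq_right h.le]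
  · rw [if_neg h, max_eq_left (not_lt.mp h)]

-- A's running-max scan equals B's max over the flattened cells.
theorem max_tab_eq_max? (x : Int) (xs : List Int) (zs : List (List Int)) :
    pv_max_tab ((x :: xs) :: zs) =
      (PySem.List.max? ((x :: xs) :: zs).flatten (fun v => v)).getD 0 := by
  have hfl : ((x :: xs) :: zs).flatten = x :: (xs ++ zs.flatten) := by simp
  rw [hfl, PySem.List.max?_id_cons]
  show ((x :: xs) :: zs).foldl
      (fun m row => row.foldl (fun m x => if m < x then x else m) m)
      ((PySem.List.pyGet? ((PySem.List.pyGet? ((x :: xs) :: zs) 0).getD []) 0).getD 0)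
      = _
  rw [if_lt_eq_max, ← List.foldl_flatten, hfl]
  simp

theorem insert_insert_same {κ ν : Type} [BEq κ] [LawfulBEq κ]
    (d : PySem.Dict κ ν) (k : κ) (v w : ν) :
    (d.insert k v).insert k w = d.insert k w := by
  apply PySem.Dict.ext
  by_cases h : d.contains k = true
  · rw [PySem.Dict.items_insert_of_contains _ w (PySem.Dict.contains_insert_self d k v),
        PySem.Dict.items_insert_of_contains _ v h,
        PySem.Dict.items_insert_of_contains _ w h, List.map_map]
    apply List.map_congr_left
    intro p _
    by_cases hp : p.1 == k
    · simp [hp]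
    · simp [hp]
  · have h1 : (d.insert k v).items = d.items ++ [(k, v)] :=
      PySem.Dict.items_insert_of_not_contains _ _ (by simpa using h)
    have h2 : (d.insert k w).items = d.items ++ [(k, w)] :=
      PySem.Dict.items_insert_of_not_contains _ _ (by simpa using h)
    rw [PySem.Dict.items_insert_of_contains _ w (PySem.Dict.contains_insert_self d k v),
        h1, h2, List.map_append]
    have : ∀ p ∈ d.items, (if p.1 == k then (k, w) else p) = p := by
      intro p hp
      have : ¬ p.1 == k := by
        intro hk
        exact h (by
          rw [PySem.Dict.contains_iff_mem_keys]
          exact (eq_of_beq hk) ▸ PySem.Dict.mem_keys_of_mem_items d hp)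
      simp [this]
    simp [List.map_congr_left this]

-- A's inner append loop over a fresh key builds the whole range in one insert.
theorem inner_fold_eq (i : Int) (r : List Int) (d : PySem.Dict Int (List Int)) (L : List Int) :
    r.foldl (fun d a => d.modify i [] (fun l => l ++ [a])) (d.insert i L) =
      d.insert i (L ++ r) := by
  induction r generalizing L with
  | nil => simp
  | cons a r ih =>
    rw [List.foldl_cons]
    have hstep : (d.insert i L).modify i [] (fun l => l ++ [a]) = d.insert i (L ++ [a]) := by
      show (d.insert i L).insert i (((d.insert i L).getD i []) ++ [a]) = _
      rw [PySem.Dict.getD_insert_self, insert_insert_same]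
    rw [hstep, ih]
    simp

-- ===== VERDICT (by name: the statement is the Claim_ definition above) =====
theorem nbr_poss_zones_spec : Claim_equal_nbr_poss_zones := by
  intro zones _ hpre
  obtain ⟨h0, h1, _⟩ := hpre
  match zones, h0 with
  | r0 :: zs, _ =>
  match r0, h1 with
  | x :: xs, _ =>
  show nbr_poss_zones _ = nbr_poss_zones_alt _
  simp only [nbr_poss_zones, nbr_poss_zones_alt, pv_compte_cases_zone]
  rw [← max_tab_eq_max? x xs zs, List.foldl_flatten]
  refine congrArg _ (PySem.List.foldl_congr_mem _ _ _ _ ?_)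
  intro acc j _
  rw [inner_fold_eq]
  simp
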